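-- pv_equiv track=rewrite | github.com/kcwww/Problem-Solving | 프로그래머스/2/389479. 서버 증설 횟수/서버 증설 횟수.py | solution
-- ===== SOURCE A (Python) =====
-- def solution(players, m, k):
--     # 시간대 24개의 배열을 만들어서 배열마다 서버를 채워놓자.
--     # 서버가 증설 될때 answer += 1
--     # 서버는 n x m 이상 (n + 1) x m 미만이라면 최소 n 대의 증설된 서버가 운영 중
--     # 서버는 한번 증설될때, K 시간만큼 운영
--     answer = 0
--     servers = [0] * 24
--     length = len(players)
--
--     for i in range(length):
--         currentServer = servers[i]
--         player = players[i]
--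
--         required = player // m
--         lack = required - currentServer
--         if (lack > 0):
--             answer += lack
--             currentTime = i
--             for _ in range(k):
--                 if (currentTime >= 24): break
--                 servers[currentTime] += lack
--                 currentTime += 1
--
--
--
--
--     return answer
-- ===== SOURCE B (Python) =====
-- def solution(players, m, k):
--     # Sweep-line with a difference array: one running count of active servers
--     # and a size-24 expiry schedule replace A's inner range-update loop.
--     answer = 0
--     current = 0
--     expire = [0] * 24
--     for i in range(len(players)):
--         current -= expire[i]
--         lack = players[i] // m - current
--         if lack > 0:
--             answer += lack
--             if k > 0:
--                 current += lack
--                 if i + k < 24: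
--                     expire[i + k] += lack
--     return answer
-- ===== Notes on version B (the rewrite author's own statement) =====
-- stated objective: faster
-- what changed: Replaced A's inner O(k) range-update over a 24-slot servers array with a sweep-line/difference-array single pass: a running active-server counter plus a size-24 expiry schedule, so each hour is processed in O(1).
import Mathlib
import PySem

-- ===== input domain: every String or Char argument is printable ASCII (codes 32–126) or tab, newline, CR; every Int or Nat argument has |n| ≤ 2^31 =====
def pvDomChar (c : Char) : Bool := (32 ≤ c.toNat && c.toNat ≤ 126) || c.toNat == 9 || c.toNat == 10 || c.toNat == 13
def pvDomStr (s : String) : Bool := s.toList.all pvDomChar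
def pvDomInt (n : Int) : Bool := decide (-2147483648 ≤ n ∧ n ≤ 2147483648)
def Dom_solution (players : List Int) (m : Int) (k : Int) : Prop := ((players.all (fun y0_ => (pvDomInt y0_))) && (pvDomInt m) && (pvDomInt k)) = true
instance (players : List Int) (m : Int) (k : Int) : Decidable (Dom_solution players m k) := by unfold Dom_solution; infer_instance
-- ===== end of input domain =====

-- B replaces A's inner O(k) range-update with a sweep-line/difference-array single pass (faster).

-- ===== PORT A =====
-- inner 'for _ in range(k): if currentTime >= 24: break; servers[currentTime] += lack; currentTime += 1'
def innerA (fuel : Nat) (ct : Nat) (lack : Int) (servers : List Int) : List Int :=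
  match fuel with
  | 0 => servers
  | f + 1 =>
    if ct ≥ 24 then servers
    else innerA f (ct + 1) lack (servers.set ct (servers.getD ct 0 + lack))

-- one iteration of A's outer loop; getD is exact here: under Pre_ every index read is in range
def stepA (players : List Int) (m : Int) (k : Int) (st : Int × List Int) (i : Nat) : Int × List Int :=
  let answer := st.1
  let servers := st.2
  let currentServer := servers.getD i 0
  let player := players.getD i 0
  let required := PySem.Int.floordiv player m
  let lack := required - currentServer
  if lack > 0 then (answer + lack, innerA k.toNat i lack servers)
  else (answer, servers)

def solution (players : List Int) (m : Int) (k : Int) : Int :=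
  ((List.range players.length).foldl (stepA players m k) (0, List.replicate 24 (0 : Int))).1

-- ===== PORT B =====
-- one iteration of B's loop: state (answer, current, expire)
def stepB (players : List Int) (m : Int) (k : Int) (st : Int × Int × List Int) (i : Nat) : Int × Int × List Int :=
  let answer := st.1
  let current := st.2.1 - st.2.2.getD i 0
  let expire := st.2.2
  let lack := PySem.Int.floordiv (players.getD i 0) m - current
  if lack > 0 then
    if k > 0 then
      if (i : Int) + k < 24 then
        (answer + lack, current + lack, expire.set (i + k.toNat) (expire.getD (i + k.toNat) 0 + lack))
      else (answer + lack, current + lack, expire)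
    else (answer + lack, current, expire)
  else (answer, current, expire)

def solution_alt (players : List Int) (m : Int) (k : Int) : Int :=
  ((List.range players.length).foldl (stepB players m k) (0, 0, List.replicate 24 (0 : Int))).1

-- ===== PRECONDITION & SPEC =====
-- Pre_ excludes exactly the inputs on which Python A raises: m = 0 with at least one
-- hour of data (ZeroDivisionError) and more than 24 hours of data (IndexError on servers[i]).
def Pre_solution (players : List Int) (m : Int) (k : Int) : Prop :=
  (players = [] ∨ m ≠ 0) ∧ players.length ≤ 24

instance (players : List Int) (m : Int) (k : Int) : Decidable (Pre_solution players m k) := by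
  unfold Pre_solution; infer_instance

def pvWitness_solution : List Int × Int × Int := ([10, 25, 3, 0], 5, 3)

def Spec_solution (players : List Int) (m : Int) (k : Int) (out : Int) : Prop := out = solution_alt players m k
instance (players : List Int) (m : Int) (k : Int) (out : Int) : Decidable (Spec_solution players m k out) := by unfold Spec_solution; infer_instance

-- ===== CLAIM (what is proved, stated in full; the proofs are below) =====
def Claim_equal_solution : Prop := ∀ (players : List Int) (m : Int) (k : Int), Dom_solution players m k → Pre_solution players m k → Spec_solution players m k (solution players m k)

-- ===== LEMMAS AND PROOFS =====

theorem getD_set_int (l : List Int) (a j : Nat) (v : Int) :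
    (l.set a v).getD j 0 = if a = j ∧ a < l.length then v else l.getD j 0 := by
  simp [List.getD_eq_getElem?_getD, List.getElem?_set]
  split_ifs with h1 h2 h3 <;> simp_all <;> omega

theorem innerA_length (fuel ct : Nat) (lack : Int) (servers : List Int) :
    (innerA fuel ct lack servers).length = servers.length := by
  induction fuel generalizing ct servers with
  | zero => rfl
  | succ f ih =>
    unfold innerA
    split
    · rfl
    · rw [ih]; simp

theorem innerA_getD (fuel ct : Nat) (lack : Int) (servers : List Int)
    (hlen : servers.length = 24) (j : Nat) :
    (innerA fuel ct lack servers).getD j 0 =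
      servers.getD j 0 + (if ct ≤ j ∧ j < ct + fuel ∧ j < 24 then lack else 0) := by
  induction fuel generalizing ct servers with
  | zero => simp [innerA]; omega
  | succ f ih =>
    unfold innerA
    split
    · next h => rw [if_neg (by omega)]; ring
    · next h =>
      rw [ih _ _ (by simp [hlen])]
      rw [getD_set_int]
      split_ifs <;> simp_all <;> omega

theorem sum_Icc_cons (f : Nat → Int) {a b : Nat} (h : a ≤ b) :
    ∑ t ∈ Finset.Icc a b, f t = f a + ∑ t ∈ Finset.Icc (a+1) b, f t := by
  rw [← Finset.insert_Icc_succ_left_eq_Icc h, Finset.sum_insert (by simp)]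
  rfl

theorem sum_Icc_set (expire : List Int) (c : Nat) (lack : Int) (hc : c < expire.length) (a b : Nat) :
    ∑ t ∈ Finset.Icc a b, (expire.set c (expire.getD c 0 + lack)).getD t 0
      = (∑ t ∈ Finset.Icc a b, expire.getD t 0) + (if c ∈ Finset.Icc a b then lack else 0) := by
  have h : ∀ t, (expire.set c (expire.getD c 0 + lack)).getD t 0
      = expire.getD t 0 + if c = t then lack else 0 := by
    intro t; rw [getD_set_int]; split_ifs with h1 h2 <;> simp_all
  rw [Finset.sum_congr rfl (fun t _ => h t), Finset.sum_add_distrib, Finset.sum_ite_eq]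

-- the loop invariant: equal answers, 24-slot arrays, and for every future hour j
-- A's servers[j] equals B's current minus the expiries scheduled in (n..j]
theorem loop_inv (players : List Int) (m : Int) (k : Int) (hlen : players.length ≤ 24) :
    ∀ n, n ≤ players.length →
      (((List.range n).foldl (stepA players m k) (0, List.replicate 24 (0 : Int))).1 =
        ((List.range n).foldl (stepB players m k) (0, 0, List.replicate 24 (0 : Int))).1) ∧
      (((List.range n).foldl (stepA players m k) (0, List.replicate 24 (0 : Int))).2.length = 24) ∧
      (((List.range n).foldl (stepB players m k) (0, 0, List.replicate 24 (0 : Int))).2.2.length = 24) ∧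
      (∀ j, n ≤ j → j < 24 →
        ((List.range n).foldl (stepA players m k) (0, List.replicate 24 (0 : Int))).2.getD j 0 =
          ((List.range n).foldl (stepB players m k) (0, 0, List.replicate 24 (0 : Int))).2.1 -
            ∑ t ∈ Finset.Icc n j,
              ((List.range n).foldl (stepB players m k) (0, 0, List.replicate 24 (0 : Int))).2.2.getD t 0) := by
  intro n
  induction n with
  | zero =>
    intro _
    refine ⟨rfl, rfl, rfl, ?_⟩
    intro j _ _
    simp only [List.range_zero, List.foldl_nil]
    have hz : ∀ t, (List.replicate 24 (0 : Int)).getD t 0 = 0 := by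
      intro t
      rw [List.getD_eq_getElem?_getD, List.getElem?_replicate]
      split <;> rfl
    rw [hz, Finset.sum_congr rfl (fun t _ => hz t)]
    simp
  | succ n ih =>
    intro hn
    obtain ⟨h1, h2, h3, h4⟩ := ih (by omega)
    have hn24 : n < 24 := by omega
    set a := (List.range n).foldl (stepA players m k) (0, List.replicate 24 (0 : Int)) with ha
    set b := (List.range n).foldl (stepB players m k) (0, 0, List.replicate 24 (0 : Int)) with hb
    simp only [List.range_succ, List.foldl_append, List.foldl_cons, List.foldl_nil, ← ha, ← hb]
    -- B's updated running count equals A's servers[n]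
    have hcur : b.2.1 - b.2.2.getD n 0 = a.2.getD n 0 := by
      rw [h4 n le_rfl hn24, Finset.Icc_self, Finset.sum_singleton]
    set lack := PySem.Int.floordiv (players.getD n 0) m - a.2.getD n 0 with hl
    have hsplit : ∀ j, n + 1 ≤ j → j < 24 →
        ∑ t ∈ Finset.Icc n j, b.2.2.getD t 0
          = b.2.2.getD n 0 + ∑ t ∈ Finset.Icc (n+1) j, b.2.2.getD t 0 :=
      fun j hj _ => sum_Icc_cons _ (by omega)
    simp only [stepA, stepB, hcur, ← hl]
    split_ifs with hlp hk hik
    · -- lack > 0, k > 0, n + k < 24: B schedules an expiry at n+k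
      have hkt : (k.toNat : Int) = k := Int.toNat_of_nonneg (by omega)
      have hc24 : n + k.toNat < 24 := by omega
      refine ⟨by dsimp only; rw [h1], by dsimp only; rw [innerA_length, h2],
        by dsimp only; simp [h3], ?_⟩
      intro j hj hj24
      dsimp only
      rw [innerA_getD _ _ _ _ h2, h4 j (by omega) hj24,
        sum_Icc_set _ _ _ (by rw [h3]; exact hc24), hsplit j (by omega) hj24]
      have hmem : (n + k.toNat ∈ Finset.Icc (n+1) j) ↔ (n + k.toNat ≤ j) := by
        simp [Finset.mem_Icc]; omega
      rw [if_congr hmem rfl rfl]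
      split_ifs <;> simp_all <;> omega
    · -- lack > 0, k > 0, n + k ≥ 24: servers active to the horizon, no expiry
      have hkt : (k.toNat : Int) = k := Int.toNat_of_nonneg (by omega)
      refine ⟨by dsimp only; rw [h1], by dsimp only; rw [innerA_length, h2], h3, ?_⟩
      intro j hj hj24
      dsimp only
      rw [innerA_getD _ _ _ _ h2, h4 j (by omega) hj24, hsplit j (by omega) hj24]
      rw [if_pos ⟨by omega, by omega, hj24⟩]
      linarith [hcur]
    · -- lack > 0, k ≤ 0: A's inner loop runs zero times, B adds no active server
      have hkt : k.toNat = 0 := by omega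
      refine ⟨by dsimp only; rw [h1], by dsimp only; rw [innerA_length, h2], h3, ?_⟩
      intro j hj hj24
      dsimp only
      rw [innerA_getD _ _ _ _ h2, h4 j (by omega) hj24, hsplit j (by omega) hj24]
      rw [if_neg (by omega)]
      linarith [hcur]
    · -- lack ≤ 0: no change on either side except B's consumed expiry
      refine ⟨h1, h2, h3, ?_⟩
      intro j hj hj24
      dsimp only
      rw [h4 j (by omega) hj24, hsplit j (by omega) hj24]
      linarith [hcur]

-- ===== VERDICT (by name: the statement is the Claim_ definition above) =====
theorem solution_spec : Claim_equal_solution := by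
  intro players m k _hd hpre
  unfold Spec_solution solution solution_alt
  exact (loop_inv players m k hpre.2 players.length le_rfl).1
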